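-- pv_equiv track=rewrite | github.com/riyuna/problem-solving | boj/1081.py | solve
-- ===== SOURCE A (Python) =====
-- d=dict()
--
-- def solve(n):
-- 	if n<0:return 0
-- 	if n in d:return d[n]
-- 	if n<10:
-- 		res=0
-- 		for i in range(n+1):res+=i
-- 		d[n]=res
-- 		return res
-- 	first=n
-- 	ct=0
-- 	res=0
-- 	while first>9:
-- 		first//=10
-- 		ct+=1
-- 	k=solve(10**ct-1)
-- 	for i in range(first):
-- 		res+=i*10**ct+k
-- 	other=n-first*10**ct
-- 	res+=(solve(other)+(other+1)*first)
-- 	d[n]=res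
-- 	return res
-- ===== SOURCE B (Python) =====
-- def solve(n):
--     if n < 0:
--         return 0
--     p, c = 1, 0
--     while p * 10 <= n:
--         p, c = p * 10, c + 1
--     total, m = 0, n
--     while c >= 0:
--         a, o = divmod(m, p)
--         total += a * (a - 1) // 2 * p + a * (45 * c * p // 10) + (o + 1) * a
--         m, p, c = o, p // 10, c - 1
--     return total
-- ===== Notes on version B (the rewrite author's own statement) =====
-- stated objective: alternative
-- what changed: Replaces A's memoized recursive power-of-ten decomposition (with inner summation loops) by an iterative most-significant-to-least digit scan that uses closed-form Gauss and block-constant formulas, with no recursion, memo table or inner loops.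
import Mathlib
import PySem

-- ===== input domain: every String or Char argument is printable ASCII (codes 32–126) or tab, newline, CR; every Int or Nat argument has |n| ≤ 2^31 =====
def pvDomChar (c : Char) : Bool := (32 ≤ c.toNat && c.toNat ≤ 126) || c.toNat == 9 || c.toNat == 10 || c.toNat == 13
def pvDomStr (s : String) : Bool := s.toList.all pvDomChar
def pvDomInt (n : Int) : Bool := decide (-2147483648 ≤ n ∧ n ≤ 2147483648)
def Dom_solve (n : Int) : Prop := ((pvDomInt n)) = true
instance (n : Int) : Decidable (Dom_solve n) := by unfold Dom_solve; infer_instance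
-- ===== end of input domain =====

-- B replaces A's memoized power-of-ten recursive decomposition with an
-- iterative digit scan using closed-form block formulas (no recursion, no memo).
-- A's module-level dict `d` is a pure memo cache: it never changes the value
-- returned, so the port computes the same recursion without the cache.

-- ===== PORT A =====
-- the `while first > 9: first //= 10; ct += 1` loop of A
def solveFC (first ct : Int) : Int × Int :=
  if first > 9 then solveFC (PySem.Int.floordiv first 10) (ct + 1) else (first, ct)
termination_by first.toNat
decreasing_by
  rw [PySem.Int.floordiv_eq_ediv_of_pos (by omega : (0:Int) < 10)]; omega

-- A's recursion, driven by explicit fuel (only a totality guard: fuel n.toNat+1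
-- always suffices, as the recursive calls are on strictly smaller nonnegative args).
-- Python's `10**ct` (ct ≥ 0 always) is written `10 ^ ct.toNat`.
def solveF : Nat → Int → Int
  | 0, _ => 0
  | fuel + 1, n =>
    if n < 0 then 0
    else if n < 10 then
      (PySem.List.pyRange 0 (n + 1) 1).foldl (fun res i => res + i) 0
    else
      let fc := solveFC n 0
      let first := fc.1
      let ct := fc.2
      let k := solveF fuel (10 ^ ct.toNat - 1)
      let res := (PySem.List.pyRange 0 first 1).foldl
        (fun res i => res + i * 10 ^ ct.toNat + k) 0
      let other := n - first * 10 ^ ct.toNat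
      res + (solveF fuel other + (other + 1) * first)

def solve (n : Int) : Int := solveF (n.toNat + 1) n

-- ===== PORT B =====
-- B's first loop: find the highest power of ten p = 10^c with p <= n
-- (fuel is only a totality guard; n.toNat+1 iterations always suffice)
def altPow (fuel : Nat) (n p c : Int) : Int × Int :=
  match fuel with
  | 0 => (p, c)
  | fuel + 1 => if p * 10 ≤ n then altPow fuel n (p * 10) (c + 1) else (p, c)

-- B's second loop: scan digits from most significant, closed-form per digit
def altLoop (fuel : Nat) (m p c total : Int) : Int :=
  match fuel with
  | 0 => total
  | fuel + 1 =>
    if 0 ≤ c then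
      let a := PySem.Int.floordiv m p
      let o := PySem.Int.mod m p
      altLoop fuel o (PySem.Int.floordiv p 10) (c - 1)
        (total + PySem.Int.floordiv (a * (a - 1)) 2 * p
          + a * PySem.Int.floordiv (45 * c * p) 10 + (o + 1) * a)
    else total

def solve_alt (n : Int) : Int :=
  if n < 0 then 0
  else
    let pc := altPow (n.toNat + 1) n 1 0
    altLoop (n.toNat + 1) n pc.1 pc.2 0

-- ===== PRECONDITION & SPEC =====
def Spec_solve (n : Int) (out : Int) : Prop := out = solve_alt n
instance (n : Int) (out : Int) : Decidable (Spec_solve n out) := by unfold Spec_solve; infer_instance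

-- ===== CLAIM (what is proved, stated in full; the proofs are below) =====
def Claim_equal_solve : Prop := ∀ (n : Int), Dom_solve n → Spec_solve n (solve n)

-- ===== LEMMAS AND PROOFS =====

-- mathematical digit sum
def ds (m : Nat) : Nat :=
  if m = 0 then 0 else m % 10 + ds (m / 10)

-- sum of digit sums of 0..n
def S (n : Nat) : Int := ∑ m ∈ Finset.range (n + 1), (ds m : Int)

theorem ds_lt10 (m : Nat) (h : m < 10) : ds m = m := by
  rw [ds]
  by_cases h0 : m = 0
  · simp [h0]
  · rw [if_neg h0, Nat.div_eq_of_lt h, Nat.mod_eq_of_lt h, ds, if_pos rfl]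
    omega

theorem ds_split (c : Nat) : ∀ a r : Nat, r < 10 ^ c → ds (a * 10 ^ c + r) = ds a + ds r := by
  induction c with
  | zero =>
    intro a r hr
    have hr0 : r = 0 := by omega
    have hds0 : ds 0 = 0 := by rw [ds, if_pos rfl]
    subst hr0
    simp [hds0]
  | succ c ih =>
    intro a r hr
    have hp : 1 ≤ 10 ^ c := Nat.one_le_pow _ _ (by norm_num)
    have hps : 10 ^ (c + 1) = 10 ^ c * 10 := pow_succ 10 c
    rcases Nat.eq_zero_or_pos (a * 10 ^ (c + 1) + r) with h0 | h0
    · have ha : a = 0 := by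
        rcases Nat.eq_zero_or_pos a with h | h
        · exact h
        · exfalso; nlinarith
      have hr0 : r = 0 := by omega
      have hds0 : ds 0 = 0 := by rw [ds, if_pos rfl]
      simp [ha, hr0, hds0]
    · rw [ds, if_neg (by omega)]
      have hmod : (a * 10 ^ (c + 1) + r) % 10 = r % 10 := by
        have : 10 ∣ a * 10 ^ (c + 1) := ⟨a * 10 ^ c, by rw [hps]; ring⟩
        omega
      have hdiv : (a * 10 ^ (c + 1) + r) / 10 = a * 10 ^ c + r / 10 := by
        have h1 : a * 10 ^ (c + 1) = a * 10 ^ c * 10 := by rw [hps]; ring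
        omega
      rw [hmod, hdiv, ih a (r / 10) (by omega)]
      have hdr : ds r = r % 10 + ds (r / 10) := by
        rcases Nat.eq_zero_or_pos r with h | h
        · have hds0 : ds 0 = 0 := by rw [ds, if_pos rfl]
          simp [h, hds0]
        · rw [ds, if_neg (by omega)]
      omega

-- sum splitting
theorem S_split (u v : Nat) :
    S (u + 1 + v) = S u + ∑ j ∈ Finset.range (v + 1), (ds (u + 1 + j) : Int) := by
  unfold S
  have : u + 1 + v + 1 = (u + 1) + (v + 1) := by ring
  rw [this, Finset.sum_range_add]

-- the block identity behind A's decomposition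
theorem S_block (c : Nat) : ∀ a : Nat, a < 10 → ∀ o : Nat, o < 10 ^ c →
    S (a * 10 ^ c + o) =
      (∑ i ∈ Finset.range a, ((i : Int) * 10 ^ c + S (10 ^ c - 1))) + S o + (o + 1) * a := by
  intro a
  induction a with
  | zero => intro _ o _; simp
  | succ a ih =>
    intro ha o ho
    have hp : 1 ≤ 10 ^ c := Nat.one_le_pow _ _ (by norm_num)
    have hmul : (a + 1) * 10 ^ c = a * 10 ^ c + 10 ^ c := by ring
    have key : (a + 1) * 10 ^ c + o = (a * 10 ^ c + (10 ^ c - 1)) + 1 + o := by omega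
    rw [key, S_split]
    rw [ih (by omega) (10 ^ c - 1) (by omega)]
    have htail : ∀ j ∈ Finset.range (o + 1),
        (ds (a * 10 ^ c + (10 ^ c - 1) + 1 + j) : Int) = ((a : Int) + 1) + (ds j : Int) := by
      intro j hj
      have hj' : j < 10 ^ c := by
        simp only [Finset.mem_range] at hj; omega
      have harg : a * 10 ^ c + (10 ^ c - 1) + 1 + j = (a + 1) * 10 ^ c + j := by omega
      rw [harg, ds_split c (a + 1) j hj', ds_lt10 (a + 1) ha]
      push_cast; ring
    have hSo : (∑ j ∈ Finset.range (o + 1), (ds j : Int)) = S o := rfl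
    have hsum : ∑ j ∈ Finset.range (o + 1), (((a : Int) + 1) + (ds j : Int)) =
        ((o : Int) + 1) * ((a : Int) + 1) + S o := by
      rw [Finset.sum_add_distrib, Finset.sum_const, Finset.card_range, nsmul_eq_mul, hSo]
      push_cast
      ring
    rw [Finset.sum_congr rfl htail, hsum, Finset.sum_range_succ, Nat.cast_sub hp]
    push_cast
    ring

-- foldl with additive accumulator = init + sum of map
theorem foldl_add_map (f : Int → Int) : ∀ (l : List Int) (init : Int),
    l.foldl (fun a x => a + f x) init = init + (l.map f).sum := by
  intro l
  induction l with
  | nil => simp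
  | cons x xs ih => intro init; simp [ih]; ring

theorem sum_map_range_int (g : Nat → Int) (m : Nat) :
    ((List.range m).map g).sum = ∑ i ∈ Finset.range m, g i := by
  induction m with
  | zero => simp
  | succ m ih => rw [List.range_succ, Finset.sum_range_succ]; simp [ih]

-- foldl over pyRange 0 b 1 with additive body
theorem foldl_pyRange_sum (f : Int → Int) (b : Int) :
    (PySem.List.pyRange 0 b 1).foldl (fun a x => a + f x) 0 =
      ∑ i ∈ Finset.range b.toNat, f i := by
  rw [foldl_add_map, PySem.List.pyRange_one, List.map_map]
  simp only [zero_add, Int.sub_zero]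
  exact sum_map_range_int (fun k => f (k : Int)) b.toNat

-- S on a single small number is the Gauss sum
theorem gauss_sum (a : Int) (ha : 0 ≤ a) :
    (∑ i ∈ Finset.range a.toNat, (i : Int)) = PySem.Int.floordiv (a * (a - 1)) 2 := by
  have h2 : (∑ i ∈ Finset.range a.toNat, i) * 2 = a.toNat * (a.toNat - 1) :=
    Finset.sum_range_id_mul_two a.toNat
  have hcast : ((∑ i ∈ Finset.range a.toNat, i : Nat) : Int) =
      ∑ i ∈ Finset.range a.toNat, (i : Int) := by push_cast; rfl
  have heven : Even (a * (a - 1)) := by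
    have := Int.even_mul_succ_self (a - 1)
    have h : (a - 1) * (a - 1 + 1) = a * (a - 1) := by ring
    rwa [h] at this
  rw [PySem.Int.floordiv_eq_ediv_of_pos (by omega : (0:Int) < 2)]
  have hmul : a * (a - 1) = (∑ i ∈ Finset.range a.toNat, (i : Int)) * 2 := by
    rcases eq_or_lt_of_le ha with h0 | h0
    · simp [← h0]
    · have hb : ((a.toNat - 1 : Nat) : Int) = a - 1 := by omega
      have := congrArg (fun x : Nat => (x : Int)) h2
      push_cast [hb, Int.toNat_of_nonneg ha] at this
      rw [← hcast]
      omega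
  rw [hmul, Int.mul_ediv_cancel _ (by norm_num : (2:Int) ≠ 0)]

-- closed form for the block constant S (10^c - 1)
theorem K_closed : ∀ c : Nat, 10 * S (10 ^ c - 1) = 45 * c * 10 ^ c := by
  intro c
  induction c with
  | zero =>
    have hds0 : ds 0 = 0 := by rw [ds, if_pos rfl]
    simp [S, hds0]
  | succ c ih =>
    have hp : 1 ≤ 10 ^ c := Nat.one_le_pow _ _ (by norm_num)
    have harg : 10 ^ (c + 1) - 1 = 9 * 10 ^ c + (10 ^ c - 1) := by
      have : 10 ^ (c + 1) = 10 ^ c * 10 := pow_succ 10 c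
      omega
    rw [harg, S_block c 9 (by norm_num) (10 ^ c - 1) (by omega)]
    have hsum : (∑ i ∈ Finset.range 9, ((i : Int) * 10 ^ c + S (10 ^ c - 1))) =
        36 * 10 ^ c + 9 * S (10 ^ c - 1) := by
      simp [Finset.sum_range_succ]
      ring
    rw [hsum, Nat.cast_sub hp]
    push_cast
    push_cast at ih
    ring_nf
    ring_nf at ih
    linarith

-- the digit-scan loop computes S, one digit position per iteration
theorem altLoop_S : ∀ (c fuel : Nat), c < fuel → ∀ (m total : Int),
    0 ≤ m → m < 10 ^ (c + 1) →
    altLoop fuel m (10 ^ c) (c : Int) total = total + S m.toNat := by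
  intro c
  induction c with
  | zero =>
    intro fuel hfuel m total hm0 hm1
    obtain ⟨f, rfl⟩ : ∃ f, fuel = f + 1 := ⟨fuel - 1, by omega⟩
    simp only [Nat.cast_zero, pow_zero]
    rw [altLoop]
    rw [if_pos (by norm_num)]
    rw [PySem.Int.floordiv_eq_ediv_of_pos (by omega : (0:Int) < 1),
      PySem.Int.mod_eq_emod_of_pos (by omega : (0:Int) < 1),
      PySem.Int.floordiv_eq_ediv_of_pos (by omega : (0:Int) < 10)]
    simp only [Int.ediv_one, Int.emod_one]
    have hstep : altLoop f 0 ((1:Int) / 10) ((0:Int) - 1)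
        (total + PySem.Int.floordiv (m * (m - 1)) 2 * 1 + m * PySem.Int.floordiv (45 * 0 * 1) 10 + (0 + 1) * m) =
        total + PySem.Int.floordiv (m * (m - 1)) 2 * 1 + m * PySem.Int.floordiv (45 * 0 * 1) 10 + (0 + 1) * m := by
      match f with
      | 0 => rw [altLoop]
      | f + 1 => rw [altLoop, if_neg (by omega)]
    rw [hstep]
    have hK0 : PySem.Int.floordiv (45 * 0 * 1) 10 = 0 := by
      rw [PySem.Int.floordiv_eq_ediv_of_pos (by omega : (0:Int) < 10)]
      norm_num
    have hS : S m.toNat = ∑ i ∈ Finset.range (m.toNat + 1), (i : Int) := by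
      unfold S
      apply Finset.sum_congr rfl
      intro i hi
      simp only [Finset.mem_range] at hi
      rw [ds_lt10 i (by omega)]
    have hg : (∑ i ∈ Finset.range (m + 1).toNat, (i : Int)) =
        PySem.Int.floordiv ((m + 1) * ((m + 1) - 1)) 2 := gauss_sum (m + 1) (by omega)
    have ht : (m + 1).toNat = m.toNat + 1 := by omega
    rw [ht] at hg
    rw [hS, hg]
    rw [PySem.Int.floordiv_eq_ediv_of_pos (by omega : (0:Int) < 2),
      PySem.Int.floordiv_eq_ediv_of_pos (by omega : (0:Int) < 2)] at *
    have heven : Even (m * (m - 1)) := by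
      have := Int.even_mul_succ_self (m - 1)
      have h : (m - 1) * (m - 1 + 1) = m * (m - 1) := by ring
      rwa [h] at this
    have hrel : (m + 1) * ((m + 1) - 1) = m * (m - 1) + 2 * m := by ring
    rw [hK0]
    obtain ⟨t, ht2⟩ := heven
    omega
  | succ c ih =>
    intro fuel hfuel m total hm0 hm1
    obtain ⟨f, rfl⟩ : ∃ f, fuel = f + 1 := ⟨fuel - 1, by omega⟩
    rw [altLoop, if_pos (by positivity)]
    have hppos : (0:Int) < 10 ^ (c + 1) := by positivity
    have hps : (10:Int) ^ (c + 2) = 10 ^ (c + 1) * 10 := pow_succ 10 (c + 1)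
    rw [PySem.Int.floordiv_eq_ediv_of_pos hppos,
      PySem.Int.mod_eq_emod_of_pos hppos,
      PySem.Int.floordiv_eq_ediv_of_pos (by omega : (0:Int) < 10)]
    set P : Int := 10 ^ (c + 1) with hP
    set a : Int := m / P with haDef
    set o : Int := m % P with hoDef
    have ha0 : 0 ≤ a := by
      rw [haDef]; exact Int.ediv_nonneg hm0 (by omega)
    have ha9 : a < 10 := by
      rw [haDef, Int.ediv_lt_iff_lt_mul hppos]; omega
    have ho0 : 0 ≤ o := Int.emod_nonneg m (by omega)
    have ho1 : o < P := Int.emod_lt_of_pos m hppos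
    have hPd : P / 10 = 10 ^ c := by
      rw [hP, pow_succ, Int.mul_ediv_cancel _ (by omega : (10:Int) ≠ 0)]
    have hc1 : ((c + 1 : Nat) : Int) - 1 = (c : Int) := by push_cast; ring
    rw [hPd, hc1, ih f (by omega) o (total + PySem.Int.floordiv (a * (a - 1)) 2 * P
        + a * PySem.Int.floordiv (45 * ((c + 1 : Nat) : Int) * P) 10 + (o + 1) * a) ho0 ho1]
    -- now identify the added value with the S_block decomposition
    have hm2 : m.toNat = a.toNat * 10 ^ (c + 1) + o.toNat := by
      have hsplit : a * P + o = m := by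
        rw [haDef, hoDef, Int.emod_def]; ring
      have hcast2 : ((a.toNat * 10 ^ (c + 1) + o.toNat : Nat) : Int) = a * P + o := by
        push_cast
        rw [Int.toNat_of_nonneg ha0, Int.toNat_of_nonneg ho0, hP]
      omega
    have hKc : a * PySem.Int.floordiv (45 * ((c + 1 : Nat) : Int) * P) 10
        = a * S (10 ^ (c + 1) - 1) := by
      congr 1
      rw [PySem.Int.floordiv_eq_ediv_of_pos (by omega : (0:Int) < 10)]
      have h10 := K_closed (c + 1)
      have harg : 45 * ((c + 1 : Nat) : Int) * P = 10 * S (10 ^ (c + 1) - 1) := by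
        rw [h10, hP]
      rw [harg]
      omega
    have hPc : ((10 ^ (c + 1) : Nat) : Int) = P := by rw [hP]; push_cast; ring
    rw [hm2, S_block (c + 1) a.toNat (by omega) o.toNat (by omega)]
    have hsum : (∑ i ∈ Finset.range a.toNat, ((i : Int) * 10 ^ (c + 1) + S (10 ^ (c + 1) - 1)))
        = PySem.Int.floordiv (a * (a - 1)) 2 * P + a * S (10 ^ (c + 1) - 1) := by
      rw [Finset.sum_add_distrib, Finset.sum_const, Finset.card_range, nsmul_eq_mul,
        ← Finset.sum_mul, gauss_sum a ha0]
      have : ((a.toNat : Nat) : Int) = a := by omega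
      rw [hP, this]
    rw [hsum, hKc]
    have hoc : ((o.toNat : Nat) : Int) = o := by omega
    have hac : ((a.toNat : Nat) : Int) = a := by omega
    rw [hoc, hac]
    ring

-- the power-finding loop
theorem altPow_spec : ∀ (fuel : Nat) (n p c : Int), 0 < p → p ≤ n → n < p * 10 ^ fuel →
    ∃ k : Nat, altPow fuel n p c = (p * 10 ^ k, c + k) ∧
      p * 10 ^ k ≤ n ∧ n < p * 10 ^ (k + 1) := by
  intro fuel
  induction fuel with
  | zero => intro n p c hp hpn hbound; simp at hbound; omega
  | succ fuel ih =>
    intro n p c hp hpn hbound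
    rw [altPow]
    by_cases hb : p * 10 ≤ n
    · rw [if_pos hb]
      obtain ⟨k, heq, hlo, hhi⟩ := ih n (p * 10) (c + 1) (by omega) hb
        (by
          have : p * 10 ^ (fuel + 1) = p * 10 * 10 ^ fuel := by
            rw [pow_succ']; ring
          omega)
      refine ⟨k + 1, ?_, by
        have : p * 10 * 10 ^ k = p * 10 ^ (k + 1) := by rw [pow_succ']; ring
        omega, by
        have : p * 10 * 10 ^ (k + 1) = p * 10 ^ (k + 1 + 1) := by rw [pow_succ']; ring
        omega⟩
      rw [heq]
      have h1 : p * 10 * 10 ^ k = p * 10 ^ (k + 1) := by rw [pow_succ']; ring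
      have h2 : c + 1 + (k : Int) = c + ((k + 1 : Nat) : Int) := by push_cast; ring
      rw [h1, h2]
    · rw [if_neg hb]
      exact ⟨0, by norm_num, by simpa using hpn, by
        have : p * 10 ^ (0 + 1) = p * 10 := by ring
        omega⟩

-- solve_alt = S
theorem alt_eq_S (n : Int) (hn : 0 ≤ n) : solve_alt n = S n.toNat := by
  unfold solve_alt
  rw [if_neg (by omega)]
  by_cases h1 : n = 0
  · subst h1
    have h2 : altPow (Int.toNat 0 + 1) 0 1 0 = (1, 0) := by decide
    show altLoop (Int.toNat 0 + 1) 0 (altPow (Int.toNat 0 + 1) 0 1 0).1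
        (altPow (Int.toNat 0 + 1) 0 1 0).2 0 = S (Int.toNat 0)
    rw [h2]
    show altLoop 1 0 (10 ^ 0) ((0 : Nat) : Int) 0 = S (Int.toNat 0)
    rw [altLoop_S 0 1 (by norm_num) 0 0 (by norm_num) (by norm_num)]
    simp
  · have hn1 : 1 ≤ n := by omega
    have hbig : n < 1 * 10 ^ (n.toNat + 1) := by
      have h4 : n.toNat < 10 ^ (n.toNat + 1) := by
        calc n.toNat < 2 ^ n.toNat := Nat.lt_two_pow_self
          _ ≤ 10 ^ (n.toNat + 1) := le_trans (Nat.pow_le_pow_left (by norm_num) _)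
            (Nat.pow_le_pow_right (by norm_num) (by omega))
      have h5 : ((10 ^ (n.toNat + 1) : Nat) : Int) = 10 ^ (n.toNat + 1) := by
        push_cast; ring
      omega
    obtain ⟨k, heq, hlo, hhi⟩ := altPow_spec (n.toNat + 1) n 1 0 (by norm_num) hn1 hbig
    have heq' : altPow (n.toNat + 1) n 1 0 = (10 ^ k, (k : Int)) := by
      rw [heq]; norm_num
    show altLoop (n.toNat + 1) n (altPow (n.toNat + 1) n 1 0).1
        (altPow (n.toNat + 1) n 1 0).2 0 = S n.toNat
    rw [heq']
    show altLoop (n.toNat + 1) n (10 ^ k) ((k : Nat) : Int) 0 = S n.toNat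
    have hkfuel : k < n.toNat + 1 := by
      have h6 : (k : Int) < 10 ^ k := by
        have := Nat.lt_two_pow_self (n := k)
        have h7 : k < 10 ^ k := lt_of_lt_of_le this (Nat.pow_le_pow_left (by norm_num) _)
        have h8 : ((10 ^ k : Nat) : Int) = 10 ^ k := by push_cast; ring
        omega
      omega
    rw [altLoop_S k (n.toNat + 1) hkfuel n 0 (by omega) (by simpa using hhi)]
    simp

-- solveFC characterisation
theorem solveFC_spec_aux : ∀ (k : Nat) (first : Int), first.toNat ≤ k → 0 < first →
    ∀ ct : Int, ∃ c : Nat, solveFC first ct = (first / 10 ^ c, ct + c) ∧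
      (10 : Int) ^ c ≤ first ∧ first < 10 ^ (c + 1) := by
  intro k
  induction k with
  | zero => intro first hk h; exact absurd h (by omega)
  | succ k ih =>
    intro first hk h ct
    rw [solveFC]
    by_cases hb : first > 9
    · rw [if_pos hb,
        PySem.Int.floordiv_eq_ediv_of_pos (by omega : (0:Int) < 10)]
      obtain ⟨c, heq, hlo, hhi⟩ := ih (first / 10) (by omega) (by omega) (ct + 1)
      refine ⟨c + 1, ?_, ?_, ?_⟩
      · rw [heq]
        have hdd : first / 10 / 10 ^ c = first / 10 ^ (c + 1) := by
          rw [Int.ediv_ediv_of_nonneg (by omega : (0:Int) ≤ 10), ← pow_succ']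
        rw [hdd]
        congr 1
        push_cast
        ring
      · have hps : (10 : Int) ^ (c + 1) = 10 ^ c * 10 := pow_succ 10 c
        have := hlo
        generalize (10 : Int) ^ c = P at this hps ⊢
        omega
      · have hps : (10 : Int) ^ (c + 1 + 1) = 10 ^ (c + 1) * 10 := pow_succ 10 (c + 1)
        have := hhi
        generalize (10 : Int) ^ (c + 1) = Q at this hps ⊢
        omega
    · rw [if_neg hb]
      exact ⟨0, by norm_num, by norm_num; omega, by norm_num; omega⟩

-- main induction: the recursion of A computes S
theorem solveF_eq_S : ∀ fuel : Nat, ∀ n : Int, n.toNat < fuel →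
    solveF fuel n = if n < 0 then 0 else S n.toNat := by
  intro fuel
  induction fuel with
  | zero => intro n h; omega
  | succ fuel ih =>
    intro n hfuel
    rw [solveF]
    by_cases h0 : n < 0
    · simp [h0]
    · rw [if_neg h0, if_neg h0]
      by_cases h10 : n < 10
      · rw [if_pos h10, foldl_pyRange_sum (fun i => i) (n + 1)]
        have h1 : (n + 1).toNat = n.toNat + 1 := by omega
        rw [h1]
        unfold S
        apply Finset.sum_congr rfl
        intro i hi
        simp only [Finset.mem_range] at hi
        rw [ds_lt10 i (by omega)]
      · rw [if_neg h10]
        obtain ⟨c, heq, hlo, hhi⟩ :=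
          solveFC_spec_aux n.toNat n le_rfl (by omega) 0
        simp only [heq, zero_add, Int.toNat_natCast]
        have hcpos : (0 : Int) < 10 ^ c := by positivity
        have hcast : ((10 ^ c : Nat) : Int) = (10 : Int) ^ c := by push_cast; ring
        have hps : (10 : Int) ^ (c + 1) = 10 ^ c * 10 := pow_succ 10 c
        set f : Int := n / 10 ^ c with hf
        have hf1 : 1 ≤ f := by
          rw [hf, Int.le_ediv_iff_mul_le hcpos]; omega
        have hf9 : f < 10 := by
          rw [hf, Int.ediv_lt_iff_lt_mul hcpos]; omega
        have hother : n - f * 10 ^ c = n % 10 ^ c := by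
          rw [hf, Int.emod_def]; ring
        have homod0 : 0 ≤ n % 10 ^ c := Int.emod_nonneg n (by omega)
        have homod1 : n % 10 ^ c < 10 ^ c := Int.emod_lt_of_pos n hcpos
        -- the recursive calls
        rw [ih (10 ^ c - 1) (by
          have : ((10 : Int) ^ c - 1).toNat < n.toNat := by omega
          omega)]
        rw [hother, ih (n % 10 ^ c) (by omega)]
        rw [if_neg (by omega : ¬ ((10 : Int) ^ c - 1 < 0)),
          if_neg (by omega : ¬ (n % 10 ^ c < 0))]
        -- the middle loop is a sum
        have hbody : (fun (res i : Int) => res + i * 10 ^ c +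
            S ((10 : Int) ^ c - 1).toNat) = (fun res i => res +
            (i * 10 ^ c + S ((10 : Int) ^ c - 1).toNat)) := by
          funext res i; ring
        rw [hbody, foldl_pyRange_sum
          (fun i => i * 10 ^ c + S ((10 : Int) ^ c - 1).toNat) f]
        -- assemble via the block identity
        have hT1 : ((10 : Int) ^ c - 1).toNat = 10 ^ c - 1 := by omega
        have hT2 : n.toNat = f.toNat * 10 ^ c + (n % 10 ^ c).toNat := by
          have hsplit : f * 10 ^ c + n % 10 ^ c = n := by
            rw [hf, Int.emod_def]; ring
          have hfge : 0 ≤ f := by omega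
          have hcast2 : ((f.toNat * 10 ^ c + (n % 10 ^ c).toNat : Nat) : Int) =
              f * 10 ^ c + n % 10 ^ c := by
            push_cast
            rw [Int.toNat_of_nonneg hfge, Int.toNat_of_nonneg homod0]
          omega
        rw [hT1, hT2, S_block c f.toNat (by omega) (n % 10 ^ c).toNat (by omega)]
        have hfc : ((f.toNat : Nat) : Int) = f := by omega
        have hoc : (((n % 10 ^ c).toNat : Nat) : Int) = n % 10 ^ c := by omega
        rw [hfc, hoc]
        ring

-- ===== VERDICT (by name: the statement is the Claim_ definition above) =====
theorem solve_spec : Claim_equal_solve := by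
  intro n _
  unfold Spec_solve solve
  rw [solveF_eq_S (n.toNat + 1) n (by omega)]
  by_cases hn : n < 0
  · simp [hn, solve_alt]
  · rw [if_neg hn, alt_eq_S n (by omega)]
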